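-- pv_equiv track=rewrite | github.com/kjnh10/pcw | work/atcoder/arc071/D/answers/209273_hahan69.py | how
-- ===== SOURCE A (Python) =====
-- def how(i):
--     j = i
--     l = [j-1 for i in range(i-1)]
--     j = i-3
--     for k in range(1,len(l)):
--         l[k] = l[k-1]+j
--         j -= 2
--     return(l)
-- ===== SOURCE B (Python) =====
-- def how(i):
--     # closed form: element k equals (i-1) + k*(i-3) - k*(k-1)
--     return [(i - 1) + k * (i - 3) - k * (k - 1) for k in range(i - 1)]
-- ===== Notes on version B (the rewrite author's own statement) =====
-- stated objective: simpler
-- what changed: Replaces the in-place prefix-sum loop with running difference j by a single comprehension computing each element independently from the closed-form quadratic (i-1)+k*(i-3)-k*(k-1).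
import Mathlib
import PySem

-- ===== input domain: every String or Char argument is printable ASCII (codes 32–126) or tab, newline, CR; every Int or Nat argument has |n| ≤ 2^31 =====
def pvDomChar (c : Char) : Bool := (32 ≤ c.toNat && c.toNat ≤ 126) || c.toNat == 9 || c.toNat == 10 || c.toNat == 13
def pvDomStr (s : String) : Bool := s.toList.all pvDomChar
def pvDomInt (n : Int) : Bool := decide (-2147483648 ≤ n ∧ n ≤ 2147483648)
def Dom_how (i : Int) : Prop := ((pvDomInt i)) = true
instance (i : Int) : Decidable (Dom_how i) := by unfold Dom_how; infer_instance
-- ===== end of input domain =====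

-- B replaces A's in-place running-difference loop by a per-index closed-form quadratic (simpler).

-- ===== PORT A =====
def how (i : Int) : List Int :=
  -- j = i; l = [j-1 for _ in range(i-1)]
  let l : List Int := (PySem.List.pyRange 0 (i - 1) 1).map (fun _ => i - 1)
  -- j = i-3; for k in range(1, len(l)): l[k] = l[k-1] + j; j -= 2
  ((PySem.List.pyRange 1 (l.length : Int) 1).foldl
    (fun (st : List Int × Int) k =>
      (st.1.set k.toNat (PySem.List.pyGetD st.1 (k - 1) 0 + st.2), st.2 - 2))
    (l, i - 3)).1

-- ===== PORT B =====
def how_alt (i : Int) : List Int :=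
  (PySem.List.pyRange 0 (i - 1) 1).map (fun k => (i - 1) + k * (i - 3) - k * (k - 1))

-- ===== PRECONDITION & SPEC =====
def Spec_how (i : Int) (out : List Int) : Prop := out = how_alt i
instance (i : Int) (out : List Int) : Decidable (Spec_how i out) := by unfold Spec_how; infer_instance

-- ===== CLAIM (what is proved, stated in full; the proofs are below) =====
def Claim_equal_how : Prop := ∀ (i : Int), Dom_how i → Spec_how i (how i)

-- ===== LEMMAS AND PROOFS =====

-- setting one cell of a mapped range changes the function at that index
theorem set_map_range (n m : Nat) (g : Nat → Int) (v : Int) (hm : m < n) :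
    ((List.range n).map g).set m v = (List.range n).map (fun t => if t = m then v else g t) := by
  apply List.ext_getElem
  · simp
  · intro t h1 h2
    simp only [List.getElem_set, List.getElem_map, List.getElem_range]
    by_cases h : t = m
    · simp [h]
    · simp [h, Ne.symm h]

-- the loop invariant: after processing k = 1 .. m, cell t holds the quadratic for t ≤ m, i-1 beyond, and j = i-3-2m
theorem how_loop_inv (i : Int) (n m : Nat) (hm : m < n) :
    ((PySem.List.pyRange 1 ((m : Int) + 1) 1).foldl
      (fun (st : List Int × Int) k =>
        (st.1.set k.toNat (PySem.List.pyGetD st.1 (k - 1) 0 + st.2), st.2 - 2))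
      ((List.range n).map (fun _ => i - 1), i - 3))
    = ((List.range n).map
        (fun t => if t ≤ m then (i - 1) + (t : Int) * (i - 3) - (t : Int) * ((t : Int) - 1) else i - 1),
       i - 3 - 2 * (m : Int)) := by
  induction m with
  | zero =>
    rw [PySem.List.pyRange_one_eq_nil (by omega)]
    simp only [List.foldl_nil, Prod.mk.injEq]
    constructor
    · congr 1
      funext t
      rcases Nat.eq_zero_or_pos t with h | h
      · subst h; simp
      · simp [Nat.not_le.mpr h]
    · push_cast; ring
  | succ m ih =>
    have hm' : m < n := by omega
    have hb : (((m + 1 : Nat) : Int)) + 1 = ((m : Int) + 1) + 1 := by push_cast; ring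
    rw [hb, PySem.List.pyRange_one_succ_right (by omega), List.foldl_append, ih hm']
    simp only [List.foldl_cons, List.foldl_nil]
    have htoNat : ((m : Int) + 1).toNat = m + 1 := by omega
    have hget : PySem.List.pyGetD
        ((List.range n).map
          (fun t => if t ≤ m then (i - 1) + (t : Int) * (i - 3) - (t : Int) * ((t : Int) - 1) else i - 1))
        (((m : Int) + 1) - 1) 0
        = (i - 1) + (m : Int) * (i - 3) - (m : Int) * ((m : Int) - 1) := by
      have h1 : (((m : Int) + 1) - 1 : Int) = (m : Int) := by ring
      rw [h1, PySem.List.pyGetD_of_nonneg _ 0 (by positivity)]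
      simp [List.getD, List.getElem?_map, List.getElem?_range, hm']
    rw [hget, htoNat, set_map_range n (m + 1) _ _ hm]
    simp only [Prod.mk.injEq]
    constructor
    · congr 1
      funext t
      by_cases h1 : t = m + 1
      · subst h1
        simp only [if_pos rfl, le_refl, if_pos]
        push_cast
        ring
      · by_cases h2 : t ≤ m
        · simp [h1, h2, Nat.le_succ_of_le h2]
        · have h3 : ¬ t ≤ m + 1 := by omega
          simp [h1, h2, h3]
    · push_cast; ring

-- ===== VERDICT (by name: the statement is the Claim_ definition above) =====
theorem how_spec : Claim_equal_how := by
  intro i _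
  unfold Spec_how how how_alt
  dsimp only
  by_cases hn : i - 1 ≤ 0
  · simp [PySem.List.pyRange_one_eq_nil hn]
  · push_neg at hn
    set n : Nat := (i - 1).toNat with hn'
    have hcast : ((i : Int) - 1) = (n : Int) := by omega
    have hlen : ((PySem.List.pyRange 0 (i - 1) 1).map (fun _ => i - 1)).length = n := by
      simp [PySem.List.length_pyRange_one]
      omega
    have hrange : (PySem.List.pyRange 0 (i - 1) 1).map (fun _ => (i - 1 : Int))
        = (List.range n).map (fun _ => i - 1) := by
      apply List.ext_getElem
      · simp [PySem.List.length_pyRange_one]; omega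
      · intro t h1 h2; simp
    rw [hrange]
    have hlen' : ((List.range n).map (fun _ => (i - 1 : Int))).length = n := by simp
    have hone : ((n : Int)) = ((n - 1 : Nat) : Int) + 1 := by omega
    have hm : n - 1 < n := by omega
    rw [hlen', hone, how_loop_inv i n (n - 1) hm]
    dsimp only
    rw [hcast, PySem.List.pyRange_zero_nat, List.map_map]
    apply List.ext_getElem
    · simp
    · intro t h1 h2
      simp only [List.getElem_map, List.getElem_range, Function.comp]
      rw [if_pos (by simp at h1; omega)]
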